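-- pv_equiv track=rewrite | github.com/Samworth27/Advent-Of-Code | aoc_2015/day01/main.py | part1
-- ===== SOURCE A (Python) =====
-- def part1(input:str):
--     floor_ = 0
--     basement = None
--     for i, inst in enumerate(input):
--         if inst == '(': floor_ += 1
--         if inst == ')': floor_ -= 1
--         if floor_ == -1 and not basement:
--             basement = i + 1
--
--     return floor_, basement
-- ===== SOURCE B (Python) =====
-- def part1(input: str):
--     # closed-form final floor, then a separate early-exit scan for the basement position
--     floor_ = input.count('(') - input.count(')')
--     basement = None
--     total = 0
--     for i, inst in enumerate(input):
--         if inst == '(':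
--             total += 1
--         elif inst == ')':
--             total -= 1
--         if total == -1:
--             basement = i + 1
--             break
--     return floor_, basement
-- ===== Notes on version B (the rewrite author's own statement) =====
-- stated objective: alternative
-- what changed: A fuses floor tracking and basement detection in one full-length loop carrying both as state; B computes the final floor as a closed form from two character counts and finds the basement position with a separate early-exit scan that breaks at the first time the running total hits -1.
import Mathlib
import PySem

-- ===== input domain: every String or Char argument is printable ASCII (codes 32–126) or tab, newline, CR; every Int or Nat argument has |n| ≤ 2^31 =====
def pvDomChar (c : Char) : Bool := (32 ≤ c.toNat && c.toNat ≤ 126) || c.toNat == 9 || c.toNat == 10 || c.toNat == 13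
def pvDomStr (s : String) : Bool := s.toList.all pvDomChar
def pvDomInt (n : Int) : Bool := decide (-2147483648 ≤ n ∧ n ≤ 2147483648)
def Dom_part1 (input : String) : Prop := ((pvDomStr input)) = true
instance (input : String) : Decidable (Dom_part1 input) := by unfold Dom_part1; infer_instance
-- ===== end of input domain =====

-- B replaces A's single fused loop (floor + basement state) by a closed-form floor from two
-- character counts plus a separate early-exit scan for the first basement entry (alternative decomposition).


-- ===== PORT A =====
-- A's loop over enumerate(input), carrying (floor_, basement).
-- 'not basement' is exact as 'st.2 = none' here: the only values ever stored are i+1 ≥ 1, which are truthy.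
def part1 (input : String) : Int × Option Int :=
  (PySem.List.enumerate input.toList 0).foldl
    (fun (st : Int × Option Int) (p : Int × Char) =>
      let f1 : Int := if p.2 = '(' then st.1 + 1 else st.1
      let f2 : Int := if p.2 = ')' then f1 - 1 else f1
      let b : Option Int := if f2 = -1 ∧ st.2 = none then some (p.1 + 1) else st.2
      (f2, b))
    (0, none)

-- ===== PORT B =====
-- B's early-exit scan (the for-loop with break), as structural recursion over the characters.
def part1AltScan : List Char → Int → Int → Option Int
  | [], _, _ => none
  | c :: cs, i, t =>
      let t' : Int := if c = '(' then t + 1 else if c = ')' then t - 1 else t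
      if t' = -1 then some (i + 1) else part1AltScan cs (i + 1) t'

def part1_alt (input : String) : Int × Option Int :=
  ((PySem.Str.count input "(" : Int) - (PySem.Str.count input ")" : Int),
   part1AltScan input.toList 0 0)

-- ===== PRECONDITION & SPEC =====
def Spec_part1 (input : String) (out : Int × Option Int) : Prop := out = part1_alt input
instance (input : String) (out : Int × Option Int) : Decidable (Spec_part1 input out) := by unfold Spec_part1; infer_instance

-- ===== CLAIM (what is proved, stated in full; the proofs are below) =====
def Claim_equal_part1 : Prop := ∀ (input : String), Dom_part1 input → Spec_part1 input (part1 input)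

-- ===== LEMMAS AND PROOFS =====

-- Python str.count with a one-character needle is the character count.
theorem go_single (c : Char) : ∀ (l : List Char) (fuel acc : Nat), l.length ≤ fuel →
    PySem.Chars.count.go [c] fuel l acc = acc + l.count c := by
  intro l
  induction l with
  | nil => intro fuel acc h; cases fuel <;> simp [PySem.Chars.count.go]
  | cons x t ih =>
    intro fuel acc h
    cases fuel with
    | zero => simp at h
    | succ n =>
      simp only [PySem.Chars.count.go]
      by_cases hx : x = c
      · subst hx
        simp [List.isPrefixOf, ih n (acc + 1) (by simpa using h)]
        omega
      · simp [List.isPrefixOf, hx, ih n acc (by simpa using h),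
          show ¬ (c == x) = true by simp [Ne.symm hx]]

theorem chars_count_single (l : List Char) (c : Char) :
    PySem.Chars.count l [c] = l.count c := by
  simp [PySem.Chars.count, go_single c l l.length 0 le_rfl]

-- abbreviation for A's loop body
def stepA (st : Int × Option Int) (p : Int × Char) : Int × Option Int :=
  let f1 : Int := if p.2 = '(' then st.1 + 1 else st.1
  let f2 : Int := if p.2 = ')' then f1 - 1 else f1
  let b : Option Int := if f2 = -1 ∧ st.2 = none then some (p.1 + 1) else st.2
  (f2, b)

def delta (l : List Char) : Int := (l.count '(' : Int) - (l.count ')' : Int)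

-- once basement is set, A's loop only accumulates the floor
theorem loopA_some (l : List Char) : ∀ (i f x : Int),
    (PySem.List.enumerate l i).foldl stepA (f, some x) = (f + delta l, some x) := by
  induction l with
  | nil => intro i f x; simp [delta]
  | cons c cs ih =>
    intro i f x
    rw [PySem.List.enumerate_cons, List.foldl_cons, show stepA (f, some x) (i, c)
      = ((if c = ')' then (if c = '(' then f + 1 else f) - 1 else (if c = '(' then f + 1 else f)), some x) by
        simp [stepA]]
    rw [ih]
    simp only [Prod.mk.injEq, and_true]
    simp only [delta, List.count_cons]
    by_cases h1 : c = '(' <;> by_cases h2 : c = ')' <;>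
      simp_all [Char.ext_iff] <;> ring

-- before basement is set, A's loop computes B's scan
theorem loopA_none (l : List Char) : ∀ (i f : Int),
    (PySem.List.enumerate l i).foldl stepA (f, none) = (f + delta l, part1AltScan l i f) := by
  induction l with
  | nil => intro i f; simp [delta, part1AltScan]
  | cons c cs ih =>
    intro i f
    rw [PySem.List.enumerate_cons, List.foldl_cons]
    have hdelta : f + delta (c :: cs)
        = (if c = ')' then (if c = '(' then f + 1 else f) - 1 else (if c = '(' then f + 1 else f)) + delta cs := by
      simp only [delta, List.count_cons]
      by_cases h1 : c = '(' <;> by_cases h2 : c = ')' <;>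
        simp_all [Char.ext_iff] <;> ring
    set f2 : Int := if c = ')' then (if c = '(' then f + 1 else f) - 1 else (if c = '(' then f + 1 else f) with hf2
    have hstep : stepA (f, none) (i, c) = (f2, if f2 = -1 then some (i + 1) else none) := by
      simp [stepA, hf2]
    have hscan : part1AltScan (c :: cs) i f
        = if f2 = -1 then some (i + 1) else part1AltScan cs (i + 1) f2 := by
      simp only [part1AltScan, hf2]
      by_cases h1 : c = '(' <;> by_cases h2 : c = ')' <;> simp_all [Char.ext_iff]
    rw [hstep, hscan, hdelta]
    by_cases hb : f2 = -1
    · simp [hb, loopA_some]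
    · simp only [if_neg hb, ih]

-- ===== VERDICT (by name: the statement is the Claim_ definition above) =====
theorem part1_spec : Claim_equal_part1 := by
  intro input _
  unfold Spec_part1 part1 part1_alt
  rw [show (fun (st : Int × Option Int) (p : Int × Char) =>
      let f1 : Int := if p.2 = '(' then st.1 + 1 else st.1
      let f2 : Int := if p.2 = ')' then f1 - 1 else f1
      let b : Option Int := if f2 = -1 ∧ st.2 = none then some (p.1 + 1) else st.2
      (f2, b)) = stepA from rfl]
  rw [loopA_none input.toList 0 0]
  simp [delta, PySem.Str.count, show "(".toList = ['('] from rfl,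
    show ")".toList = [')'] from rfl, chars_count_single]
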